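-- pv_equiv track=rewrite | github.com/jizhideFrank/software-programming | school-assignment/sokoban_solver/solution.py | minimum_distance_vertical
-- ===== SOURCE A (Python) =====
-- def minimum_distance_vertical(list_of_y_value, my_y_value):
--   greater = []
--   smaller = []
--   for num in list_of_y_value:
--     if num > my_y_value:
--       greater.append(num)
--     else:
--       smaller.append(num)
--
--   nearest_value_above = 0
--   nearest_value_bottom = 0
--   if len(greater) == 0:
--     nearest_value_above += 9999
--   else:
--     nearest_value_above += min(greater)
--
--   if len(smaller) == 0:
--     nearest_value_bottom += 0
--   else:
--     nearest_value_bottom += max(smaller)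
--
--   return (nearest_value_above, nearest_value_bottom)
-- ===== SOURCE B (Python) =====
-- def minimum_distance_vertical(list_of_y_value, my_y_value):
--     best_above = None
--     best_below = None
--     for num in list_of_y_value:
--         if num > my_y_value:
--             best_above = num if best_above is None else min(best_above, num)
--         else:
--             best_below = num if best_below is None else max(best_below, num)
--     return (9999 if best_above is None else best_above,
--             0 if best_below is None else best_below)
-- ===== Notes on version B (the rewrite author's own statement) =====
-- stated objective: simpler
-- what changed: Replaced the two intermediate partition lists plus separate min()/max() scans with a single pass keeping two optional running extrema.
import Mathlib
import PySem

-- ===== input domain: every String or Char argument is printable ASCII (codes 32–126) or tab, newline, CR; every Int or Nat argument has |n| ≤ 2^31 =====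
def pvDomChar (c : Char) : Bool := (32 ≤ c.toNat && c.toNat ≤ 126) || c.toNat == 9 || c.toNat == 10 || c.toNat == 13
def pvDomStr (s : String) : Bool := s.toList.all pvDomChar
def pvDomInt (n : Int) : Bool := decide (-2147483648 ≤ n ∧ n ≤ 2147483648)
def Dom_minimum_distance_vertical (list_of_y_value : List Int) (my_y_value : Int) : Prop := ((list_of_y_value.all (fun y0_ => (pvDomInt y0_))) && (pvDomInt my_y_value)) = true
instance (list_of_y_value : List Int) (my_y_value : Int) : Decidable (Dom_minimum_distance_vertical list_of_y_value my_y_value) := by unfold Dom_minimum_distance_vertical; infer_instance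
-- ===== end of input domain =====

-- B replaces A's two partition lists and separate min()/max() scans by one pass with two optional running extrema (objective: simpler).


-- ===== PORT A =====
def minimum_distance_vertical (list_of_y_value : List Int) (my_y_value : Int) : Int × Int :=
  let gs := list_of_y_value.foldl
    (fun (gs : List Int × List Int) num =>
      if num > my_y_value then (gs.1 ++ [num], gs.2) else (gs.1, gs.2 ++ [num]))
    ([], [])
  let greater := gs.1
  let smaller := gs.2
  -- min(greater)/max(smaller) are only taken on the nonempty branch, so getD 0 is never reached
  let nearest_value_above : Int :=
    if greater.length == 0 then 0 + 9999
    else 0 + (PySem.List.min? greater (fun x => x)).getD 0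
  let nearest_value_bottom : Int :=
    if smaller.length == 0 then 0 + 0
    else 0 + (PySem.List.max? smaller (fun x => x)).getD 0
  (nearest_value_above, nearest_value_bottom)

-- ===== PORT B =====
def minimum_distance_vertical_alt (list_of_y_value : List Int) (my_y_value : Int) : Int × Int :=
  let st := list_of_y_value.foldl
    (fun (st : Option Int × Option Int) num =>
      if num > my_y_value then
        (some (match st.1 with | none => num | some a => min a num), st.2)
      else
        (st.1, some (match st.2 with | none => num | some b => max b num)))
    (none, none)
  (st.1.getD 9999, st.2.getD 0)

-- ===== PRECONDITION & SPEC =====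
def Spec_minimum_distance_vertical (list_of_y_value : List Int) (my_y_value : Int) (out : Int × Int) : Prop := out = minimum_distance_vertical_alt list_of_y_value my_y_value
instance (list_of_y_value : List Int) (my_y_value : Int) (out : Int × Int) : Decidable (Spec_minimum_distance_vertical list_of_y_value my_y_value out) := by unfold Spec_minimum_distance_vertical; infer_instance

-- ===== CLAIM (what is proved, stated in full; the proofs are below) =====
def Claim_equal_minimum_distance_vertical : Prop := ∀ (list_of_y_value : List Int) (my_y_value : Int), Dom_minimum_distance_vertical list_of_y_value my_y_value → Spec_minimum_distance_vertical list_of_y_value my_y_value (minimum_distance_vertical list_of_y_value my_y_value)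

-- ===== LEMMAS AND PROOFS =====

-- running-min / running-max over a list with an Option accumulator (B's update law)
def optMin (o : Option Int) (xs : List Int) : Option Int :=
  xs.foldl (fun o n => some (match o with | none => n | some a => min a n)) o

def optMax (o : Option Int) (xs : List Int) : Option Int :=
  xs.foldl (fun o n => some (match o with | none => n | some b => max b n)) o

theorem optMin_some (a : Int) (xs : List Int) : optMin (some a) xs = some (xs.foldl min a) := by
  induction xs generalizing a with
  | nil => rfl
  | cons x t ih => simp [optMin, List.foldl] at *; exact ih _

theorem optMax_some (a : Int) (xs : List Int) : optMax (some a) xs = some (xs.foldl max a) := by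
  induction xs generalizing a with
  | nil => rfl
  | cons x t ih => simp [optMax, List.foldl] at *; exact ih _

theorem optMin_none_cons (x : Int) (t : List Int) : optMin none (x :: t) = some (t.foldl min x) := by
  simp [optMin]; exact optMin_some x t

theorem optMax_none_cons (x : Int) (t : List Int) : optMax none (x :: t) = some (t.foldl max x) := by
  simp [optMax]; exact optMax_some x t

-- A's loop is partition-by-filter
theorem foldA_eq (l : List Int) (y : Int) (g s : List Int) :
    l.foldl (fun (gs : List Int × List Int) num =>
      if num > y then (gs.1 ++ [num], gs.2) else (gs.1, gs.2 ++ [num])) (g, s)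
    = (g ++ l.filter (fun n => n > y), s ++ l.filter (fun n => ¬ n > y)) := by
  induction l generalizing g s with
  | nil => simp
  | cons x t ih =>
    by_cases h : x > y <;> simp [List.foldl, h, ih, List.filter_cons]

-- B's loop maintains the running extrema of the two filtered sublists
theorem foldB_eq (l : List Int) (y : Int) (oa ob : Option Int) :
    l.foldl (fun (st : Option Int × Option Int) num =>
      if num > y then
        (some (match st.1 with | none => num | some a => min a num), st.2)
      else
        (st.1, some (match st.2 with | none => num | some b => max b num))) (oa, ob)
    = (optMin oa (l.filter (fun n => n > y)), optMax ob (l.filter (fun n => ¬ n > y))) := by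
  induction l generalizing oa ob with
  | nil => simp [optMin, optMax]
  | cons x t ih =>
    by_cases h : x > y
    · simp [List.foldl, h, ih, List.filter_cons, optMin, optMax]
    · have h' : x ≤ y := by omega
      simp [List.foldl, h, h', ih, List.filter_cons, optMin, optMax]

-- ===== VERDICT (by name: the statement is the Claim_ definition above) =====
theorem minimum_distance_vertical_spec : Claim_equal_minimum_distance_vertical := by
  intro l y _
  unfold Spec_minimum_distance_vertical minimum_distance_vertical minimum_distance_vertical_alt
  simp only [foldA_eq, foldB_eq, List.nil_append]
  cases hg : l.filter (fun n => n > y) with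
  | nil => cases hs : l.filter (fun n => ¬ n > y) with
    | nil => simp [optMin, optMax]
    | cons b bs => simp [optMin, optMax_none_cons, PySem.List.max?_id_cons]
  | cons a as => cases hs : l.filter (fun n => ¬ n > y) with
    | nil => simp [optMax, optMin_none_cons, PySem.List.min?_id_cons]
    | cons b bs => simp [optMin_none_cons, optMax_none_cons, PySem.List.min?_id_cons, PySem.List.max?_id_cons]
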